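-- pv_equiv track=rewrite | github.com/Siddhartha-Mahajan/verifier | helper/stilllife.py | _check_stability_full
-- ===== SOURCE A (Python) =====
-- from typing import Dict, Any, Optional, List, Tuple
--
-- DIRECTIONS = [(-1, -1), (-1, 0), (-1, 1),
--               (0, -1),           (0, 1),
--               (1, -1),  (1, 0),  (1, 1)]
--
-- def _count_live_neighbors(grid: List[List[int]], n: int, r: int, c: int) -> int:
--     """Count live neighbors of cell (r, c)."""
--     count = 0
--     for dr, dc in DIRECTIONS:
--         nr, nc = r + dr, c + dc
--         if 0 <= nr < n and 0 <= nc < n: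
--             count += grid[nr][nc]
--     return count
--
-- def _check_stability_full(grid: List[List[int]], n: int) -> Tuple[bool, int]:
--     """
--     Check stability and return (all_ok, total_violation_count).
--
--     Includes the one-cell exterior ring around the n x n box so births outside
--     the box are counted as violations.
--
--     Does not collect individual violations, just counts.
--     """
--     count = 0
--     for r in range(-1, n + 1):
--         for c in range(-1, n + 1):
--             nb = _count_live_neighbors(grid, n, r, c)
--             alive = 0 <= r < n and 0 <= c < n and grid[r][c] == 1
--             if alive:
--                 if nb not in (2, 3):
--                     count += 1
--             else:
--                 if nb == 3:
--                     count += 1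
--     return count == 0, count
-- ===== SOURCE B (Python) =====
-- def _check_stability_full(grid, n):
--     # Scatter pass: add each cell's value to its 8 neighbours in a dict keyed
--     # by (r, c), covering the exterior ring implicitly.
--     table = {}
--     for i in range(n):
--         row = grid[i]
--         for j in range(n):
--             v = row[j]
--             for dr, dc in ((-1, -1), (-1, 0), (-1, 1),
--                            (0, -1),           (0, 1),
--                            (1, -1),  (1, 0),  (1, 1)):
--                 key = (i + dr, j + dc)
--                 table[key] = table.get(key, 0) + v
--
--     # A cell violates stability iff its Game-of-Life next state differs
--     # from its current state.
--     def violates(rc):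
--         r, c = rc
--         nb = table.get(rc, 0)
--         cur = 1 if 0 <= r < n and 0 <= c < n and grid[r][c] == 1 else 0
--         nxt = 1 if nb == 3 or (cur == 1 and nb == 2) else 0
--         return nxt != cur
--
--     cells = [(r, c) for r in range(-1, n + 1) for c in range(-1, n + 1)]
--     count = len([p for p in cells if violates(p)])
--     return count == 0, count
-- ===== Notes on version B (the rewrite author's own statement) =====
-- stated objective: alternative
-- what changed: Replaces A's per-cell 8-way gather of neighbor counts and branch-based increment with a scatter-built (r,c)-keyed neighbor table, a next-state-vs-current-state 'violates' predicate, and a filter/len count over the flattened cell list.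
import Mathlib
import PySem

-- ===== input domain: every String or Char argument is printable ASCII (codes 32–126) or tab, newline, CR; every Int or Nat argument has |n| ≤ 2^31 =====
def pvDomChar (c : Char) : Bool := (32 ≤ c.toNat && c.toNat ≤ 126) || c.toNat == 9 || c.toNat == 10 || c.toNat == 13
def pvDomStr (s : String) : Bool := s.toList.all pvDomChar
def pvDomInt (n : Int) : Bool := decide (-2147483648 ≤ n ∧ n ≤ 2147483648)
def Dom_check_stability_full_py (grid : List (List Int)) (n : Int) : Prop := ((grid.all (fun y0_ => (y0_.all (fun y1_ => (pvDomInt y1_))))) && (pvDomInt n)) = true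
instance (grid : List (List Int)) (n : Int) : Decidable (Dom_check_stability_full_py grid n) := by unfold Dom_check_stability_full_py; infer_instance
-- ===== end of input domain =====

-- B replaces A's per-cell 8-way gather-and-branch counting with a scatter-built neighbor table plus a filter that counts cells whose Game-of-Life next state differs from the current one; alternative decomposition, same asymptotics.


-- ===== PORT A =====
def pvDirections : List (Int × Int) :=
  [(-1, -1), (-1, 0), (-1, 1), (0, -1), (0, 1), (1, -1), (1, 0), (1, 1)]

-- grid[r][c]; inside Pre_ every index actually used is in range, so the defaults never fire there
def pvCell (grid : List (List Int)) (r c : Int) : Int :=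
  PySem.List.pyGetD (PySem.List.pyGetD grid r []) c 0

def pvCountLiveNeighbors (grid : List (List Int)) (n r c : Int) : Int :=
  pvDirections.foldl (fun count d =>
    if 0 ≤ r + d.1 ∧ r + d.1 < n ∧ 0 ≤ c + d.2 ∧ c + d.2 < n then
      count + pvCell grid (r + d.1) (c + d.2)
    else count) 0

def check_stability_full_py (grid : List (List Int)) (n : Int) : Bool × Int :=
  let count := (PySem.List.pyRange (-1) (n + 1) 1).foldl (fun count r =>
    (PySem.List.pyRange (-1) (n + 1) 1).foldl (fun count c =>
      let nb := pvCountLiveNeighbors grid n r c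
      let alive := 0 ≤ r ∧ r < n ∧ 0 ≤ c ∧ c < n ∧ pvCell grid r c = 1
      if alive then (if ¬(nb = 2 ∨ nb = 3) then count + 1 else count)
      else (if nb = 3 then count + 1 else count)) count) 0
  (count == 0, count)

-- ===== PORT B =====
def pvScatterTable (grid : List (List Int)) (n : Int) : PySem.Dict (Int × Int) Int :=
  (PySem.List.pyRange 0 n 1).foldl (fun t i =>
    (PySem.List.pyRange 0 n 1).foldl (fun t j =>
      let v := pvCell grid i j
      pvDirections.foldl (fun t d =>
        t.modify (i + d.1, j + d.2) 0 (· + v)) t) t) PySem.Dict.empty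

-- B's 'violates': the next Game-of-Life state differs from the current one
def pvViolates (grid : List (List Int)) (n : Int)
    (table : PySem.Dict (Int × Int) Int) (rc : Int × Int) : Bool :=
  let nb := table.getD rc 0
  let cur : Int :=
    if 0 ≤ rc.1 ∧ rc.1 < n ∧ 0 ≤ rc.2 ∧ rc.2 < n ∧ pvCell grid rc.1 rc.2 = 1 then 1 else 0
  let nxt : Int := if nb = 3 ∨ (cur = 1 ∧ nb = 2) then 1 else 0
  nxt != cur

def check_stability_full_py_alt (grid : List (List Int)) (n : Int) : Bool × Int :=
  let table := pvScatterTable grid n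
  let cells := (PySem.List.pyRange (-1) (n + 1) 1).flatMap (fun r =>
    (PySem.List.pyRange (-1) (n + 1) 1).map (fun c => (r, c)))
  let count : Int := ((cells.filter (pvViolates grid n table)).length : Int)
  (count == 0, count)

-- ===== PRECONDITION & SPEC =====
-- Pre_ excludes exactly the inputs where the Python A raises IndexError: n exceeding the
-- number of rows, or one of the first n rows shorter than n (every such cell is read when n ≥ 1).
def Pre_check_stability_full_py (grid : List (List Int)) (n : Int) : Prop :=
  n ≤ (grid.length : Int) ∧ ∀ row ∈ grid.take n.toNat, n ≤ (row.length : Int)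
instance (grid : List (List Int)) (n : Int) : Decidable (Pre_check_stability_full_py grid n) := by
  unfold Pre_check_stability_full_py; infer_instance

def pvWitness_check_stability_full_py : List (List Int) × Int := ([[1, 1], [1, 1]], 2)

def Spec_check_stability_full_py (grid : List (List Int)) (n : Int) (out : Bool × Int) : Prop := out = check_stability_full_py_alt grid n
instance (grid : List (List Int)) (n : Int) (out : Bool × Int) : Decidable (Spec_check_stability_full_py grid n out) := by unfold Spec_check_stability_full_py; infer_instance

-- ===== CLAIM (what is proved, stated in full; the proofs are below) =====
def Claim_equal_check_stability_full_py : Prop := ∀ (grid : List (List Int)) (n : Int), Dom_check_stability_full_py grid n → Pre_check_stability_full_py grid n → Spec_check_stability_full_py grid n (check_stability_full_py grid n)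

-- ===== LEMMAS AND PROOFS =====

-- a fold whose every step adds g x to the value looked up at k adds the mapped sum
theorem pv_foldl_getD_add {α : Type} (l : List α)
    (F : PySem.Dict (Int × Int) Int → α → PySem.Dict (Int × Int) Int) (g : α → Int)
    (k : Int × Int)
    (h : ∀ t x, (F t x).getD k 0 = t.getD k 0 + g x) :
    ∀ t : PySem.Dict (Int × Int) Int,
      (l.foldl F t).getD k 0 = t.getD k 0 + (l.map g).sum := by
  induction l with
  | nil => intro t; simp
  | cons x xs ih =>
      intro t
      simp only [List.foldl_cons, List.map_cons, List.sum_cons]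
      rw [ih, h]; ring

-- the scatter table looked up at k is the triple indicator sum over source cells and directions
theorem pv_table_getD (grid : List (List Int)) (n : Int) (k : Int × Int) :
    (pvScatterTable grid n).getD k 0 =
      ((PySem.List.pyRange 0 n 1).map (fun i =>
        ((PySem.List.pyRange 0 n 1).map (fun j =>
          (pvDirections.map (fun d =>
            if i = k.1 - d.1 ∧ j = k.2 - d.2 then pvCell grid i j else 0)).sum)).sum)).sum := by
  have hdir : ∀ (i j : Int) (t : PySem.Dict (Int × Int) Int),
      (pvDirections.foldl (fun t d =>
        t.modify (i + d.1, j + d.2) 0 (· + pvCell grid i j)) t).getD k 0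
      = t.getD k 0 + (pvDirections.map (fun d =>
          if i = k.1 - d.1 ∧ j = k.2 - d.2 then pvCell grid i j else 0)).sum := by
    intro i j t
    apply pv_foldl_getD_add
    intro t d
    rw [PySem.Dict.getD_modify]
    rcases k with ⟨k1, k2⟩
    simp only [Prod.mk.injEq]
    split_ifs with h1 h2 h2
    · obtain ⟨hk1, hk2⟩ := h1
      rw [show ((i + d.1, j + d.2) : Int × Int) = (k1, k2) from by rw [hk1, hk2]]
    · exact absurd ⟨by omega, by omega⟩ h2
    · exact absurd ⟨by omega, by omega⟩ h1
    · ring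
  have hrow : ∀ (i : Int) (t : PySem.Dict (Int × Int) Int),
      ((PySem.List.pyRange 0 n 1).foldl (fun t j =>
        let v := pvCell grid i j
        pvDirections.foldl (fun t d => t.modify (i + d.1, j + d.2) 0 (· + v)) t) t).getD k 0
      = t.getD k 0 + ((PySem.List.pyRange 0 n 1).map (fun j =>
          (pvDirections.map (fun d =>
            if i = k.1 - d.1 ∧ j = k.2 - d.2 then pvCell grid i j else 0)).sum)).sum := by
    intro i
    apply pv_foldl_getD_add
    intro t j
    exact hdir i j t
  unfold pvScatterTable
  rw [pv_foldl_getD_add _ _ _ k (fun t i => hrow i t)]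
  simp [PySem.Dict.getD_empty]

theorem pv_sum_ind_aux (m : Nat) (a t : Int) (f : Int → Int) :
    ((List.map (fun k : Nat => a + (k : Int)) (List.range m)).map
        (fun i => if i = t then f i else 0)).sum =
      if a ≤ t ∧ t < a + m then f t else 0 := by
  induction m with
  | zero =>
      simp only [List.range_zero, List.map_nil, List.sum_nil]
      rw [if_neg]; push_cast; omega
  | succ m ih =>
      rw [List.range_succ]
      simp only [List.map_append, List.map_cons, List.map_nil, List.sum_append, List.sum_cons,
        List.sum_nil, add_zero]
      rw [ih]
      split_ifs with h1 h2 h3 h4 h5 <;> push_cast at * <;> try omega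
      all_goals (subst h5; ring)

-- an indicator sum over a range collapses to the indicated term
theorem pv_sum_ind (a b t : Int) (f : Int → Int) :
    ((PySem.List.pyRange a b 1).map (fun i => if i = t then f i else 0)).sum =
      if a ≤ t ∧ t < b then f t else 0 := by
  rw [PySem.List.pyRange_one, pv_sum_ind_aux]
  split_ifs with h1 h2 h3 <;> try rfl
  · exfalso; omega
  · exfalso; omega

-- the double indicator sum over the grid box collapses to one guarded cell read
theorem pv_double_ind (grid : List (List Int)) (n r c dr dc : Int) :
    ((PySem.List.pyRange 0 n 1).map (fun i =>
      ((PySem.List.pyRange 0 n 1).map (fun j =>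
        if i = r - dr ∧ j = c - dc then pvCell grid i j else 0)).sum)).sum
    = if 0 ≤ r - dr ∧ r - dr < n ∧ 0 ≤ c - dc ∧ c - dc < n then
        pvCell grid (r - dr) (c - dc) else 0 := by
  have hj : ∀ i : Int,
      ((PySem.List.pyRange 0 n 1).map (fun j =>
        if i = r - dr ∧ j = c - dc then pvCell grid i j else 0)).sum
      = if i = r - dr then
          (if 0 ≤ c - dc ∧ c - dc < n then pvCell grid i (c - dc) else 0) else 0 := by
    intro i
    have hfun : (fun j => if i = r - dr ∧ j = c - dc then pvCell grid i j else 0)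
        = (fun j => if j = c - dc then (if i = r - dr then pvCell grid i j else 0) else 0) := by
      funext j
      split_ifs <;> first | rfl | omega
    rw [hfun, pv_sum_ind 0 n (c - dc) (fun j => if i = r - dr then pvCell grid i j else 0)]
    split_ifs <;> rfl
  simp only [hj]
  rw [pv_sum_ind 0 n (r - dr)
    (fun i => if 0 ≤ c - dc ∧ c - dc < n then pvCell grid i (c - dc) else 0)]
  split_ifs <;> first | rfl | omega

-- the table lookup at (r, c) equals A's gathered neighbor count
theorem pv_nb_eq (grid : List (List Int)) (n r c : Int) :
    (pvScatterTable grid n).getD (r, c) 0 = pvCountLiveNeighbors grid n r c := by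
  have hA : pvCountLiveNeighbors grid n r c =
      (pvDirections.map (fun d =>
        if 0 ≤ r + d.1 ∧ r + d.1 < n ∧ 0 ≤ c + d.2 ∧ c + d.2 < n then
          pvCell grid (r + d.1) (c + d.2) else 0)).sum := by
    unfold pvCountLiveNeighbors
    rw [PySem.List.foldl_congr_mem pvDirections _
      (fun count d => count +
        if 0 ≤ r + d.1 ∧ r + d.1 < n ∧ 0 ≤ c + d.2 ∧ c + d.2 < n then
          pvCell grid (r + d.1) (c + d.2) else 0)
      0 (by
        intro acc d _
        by_cases h : 0 ≤ r + d.1 ∧ r + d.1 < n ∧ 0 ≤ c + d.2 ∧ c + d.2 < n <;> simp [h])]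
    rw [PySem.List.foldl_add]
    ring
  rw [pv_table_getD, hA]
  simp only [pvDirections, List.map_cons, List.map_nil, List.sum_cons, List.sum_nil, add_zero,
    PySem.List.sum_map_add_int]
  rw [pv_double_ind grid n r c (-1) (-1), pv_double_ind grid n r c (-1) 0,
    pv_double_ind grid n r c (-1) 1, pv_double_ind grid n r c 0 (-1),
    pv_double_ind grid n r c 0 1, pv_double_ind grid n r c 1 (-1),
    pv_double_ind grid n r c 1 0, pv_double_ind grid n r c 1 1]
  ring_nf

-- A's per-cell branch increments exactly when B's 'violates' predicate holds
theorem pv_step_eq (grid : List (List Int)) (n r c count : Int) :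
    (let nb := pvCountLiveNeighbors grid n r c
     let alive := 0 ≤ r ∧ r < n ∧ 0 ≤ c ∧ c < n ∧ pvCell grid r c = 1
     if alive then (if ¬(nb = 2 ∨ nb = 3) then count + 1 else count)
     else (if nb = 3 then count + 1 else count))
    = if pvViolates grid n (pvScatterTable grid n) (r, c) then count + 1 else count := by
  simp only [pvViolates, pv_nb_eq]
  set nb := pvCountLiveNeighbors grid n r c with hnb
  by_cases ha : 0 ≤ r ∧ r < n ∧ 0 ≤ c ∧ c < n ∧ pvCell grid r c = 1 <;>
    by_cases h2 : nb = 2 <;> by_cases h3 : nb = 3 <;>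
      simp [ha, h2, h3]

-- counting with a fold of guarded increments is the length of the filter
theorem pv_foldl_count {α : Type} (p : α → Bool) (l : List α) :
    ∀ a : Int, l.foldl (fun acc x => if p x then acc + 1 else acc) a
      = a + ((l.filter p).length : Int) := by
  induction l with
  | nil => intro a; simp
  | cons x xs ih =>
      intro a
      by_cases h : p x = true <;>
        simp [List.foldl_cons, h, ih] <;> push_cast <;> ring

-- folding the per-row filtered lengths equals filtering the flattened cell list
theorem pv_outer_count (L : List Int) (g : Int → List Int) (p : Int × Int → Bool) :
    ∀ a : Int, L.foldl (fun acc r => acc + (((g r).filter (fun c => p (r, c))).length : Int)) a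
      = a + (((L.flatMap (fun r => (g r).map (fun c => (r, c)))).filter p).length : Int) := by
  induction L with
  | nil => intro a; simp
  | cons x xs ih =>
      intro a
      simp only [List.foldl_cons, List.flatMap_cons, List.filter_append, List.length_append]
      rw [ih]
      rw [List.filter_map]
      simp only [List.length_map]
      simp only [Function.comp_def]
      push_cast
      ring

-- ===== VERDICT (by name: the statement is the Claim_ definition above) =====
theorem check_stability_full_py_spec : Claim_equal_check_stability_full_py := by
  intro grid n _ _
  unfold Spec_check_stability_full_py check_stability_full_py check_stability_full_py_alt
  have hcnt : (PySem.List.pyRange (-1) (n + 1) 1).foldl (fun count r =>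
      (PySem.List.pyRange (-1) (n + 1) 1).foldl (fun count c =>
        let nb := pvCountLiveNeighbors grid n r c
        let alive := 0 ≤ r ∧ r < n ∧ 0 ≤ c ∧ c < n ∧ pvCell grid r c = 1
        if alive then (if ¬(nb = 2 ∨ nb = 3) then count + 1 else count)
        else (if nb = 3 then count + 1 else count)) count) 0
      = ((((PySem.List.pyRange (-1) (n + 1) 1).flatMap (fun r =>
          (PySem.List.pyRange (-1) (n + 1) 1).map (fun c => (r, c)))).filter
            (pvViolates grid n (pvScatterTable grid n))).length : Int) := by
    have h1 : ∀ a : Int, (PySem.List.pyRange (-1) (n + 1) 1).foldl (fun count r =>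
        (PySem.List.pyRange (-1) (n + 1) 1).foldl (fun count c =>
          let nb := pvCountLiveNeighbors grid n r c
          let alive := 0 ≤ r ∧ r < n ∧ 0 ≤ c ∧ c < n ∧ pvCell grid r c = 1
          if alive then (if ¬(nb = 2 ∨ nb = 3) then count + 1 else count)
          else (if nb = 3 then count + 1 else count)) count) a
        = (PySem.List.pyRange (-1) (n + 1) 1).foldl (fun acc r =>
            acc + ((((PySem.List.pyRange (-1) (n + 1) 1)).filter
              (fun c => pvViolates grid n (pvScatterTable grid n) (r, c))).length : Int)) a := by
      intro a
      apply PySem.List.foldl_congr_mem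
      intro acc r _
      rw [PySem.List.foldl_congr_mem _ _
        (fun count c => if pvViolates grid n (pvScatterTable grid n) (r, c) then count + 1
          else count) acc (by intro acc' c _; exact pv_step_eq grid n r c acc')]
      exact pv_foldl_count _ _ acc
    rw [h1 0, pv_outer_count]
    ring
  simp only [hcnt]
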